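-- pv_equiv track=rewrite | github.com/NtapeKnoxSiwale/Daily-Coding-Challenges | Challenge01.py | checking_the_sum_of_two_num
-- ===== SOURCE A (Python) =====
-- def checking_the_sum_of_two_num(list):
--     """
--     Finds any two numbers in the list that add up to the same number.
--
--     Args:
--         list (list): The list of numbers to search.
--
--     Returns:
--         tuple: A tuple containing the sum of the pair of numbers and a list of all pairs that add up to the same number,
--         or None if no such pair is found.
--     """
--     pairs = []  # List to store pairs of numbers
--     n = len(list)
--     for i in range(n):
--         for j in range(i + 1, n):
--             current_sum = list[i] + list[j]  # Calculate the sum of the current pair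
--             existing_pair = next((pair for pair in pairs if pair[0] == current_sum), None)
--             # Check if a pair with the same sum already exists in the pairs list
--             if existing_pair is None:
--                 # If no pair exists, add the current pair to the pairs list
--                 pairs.append((current_sum, list[i], list[j]))
--             else:
--                 existing_pair_numbers = (existing_pair[1], existing_pair[2])
--                 current_pair_numbers = (list[i], list[j])
--                 # Check if the current pair contains different numbers than the existing pair
--                 if current_pair_numbers != existing_pair_numbers:
--                     # If different numbers, return the sum and both pairs
--                     return current_sum, [existing_pair_numbers, current_pair_numbers]
--     return None
-- ===== SOURCE B (Python) =====
-- def _pairs(lst):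
--     """All i<j pairs as (sum, (x, y)), in scan order."""
--     seq = []
--     rest = lst
--     while rest:
--         x, rest = rest[0], rest[1:]
--         for y in rest:
--             seq.append((x + y, (x, y)))
--     return seq
--
-- def checking_the_sum_of_two_num(list):
--     """Group-then-select: build the complete sum -> [(position, pair), ...] index
--     over the whole pair stream first, then pick, over all sums, the earliest
--     position at which a sum receives a second pair distinct from its first one.
--     No early exit and no rescan of an accumulated pairs list."""
--     groups = {}
--     for pos, (s, p) in enumerate(_pairs(list)):
--         groups.setdefault(s, []).append((pos, p))
--     best = None
--     for s, ps in groups.items():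
--         first = ps[0][1]
--         hit = next((e for e in ps[1:] if e[1] != first), None)
--         if hit is not None and (best is None or hit[0] < best[0]):
--             best = (hit[0], s, first, hit[1])
--     return None if best is None else (best[1], [best[2], best[3]])
-- ===== Notes on version B (the rewrite author's own statement) =====
-- stated objective: alternative
-- what changed: Instead of scanning pairs with early exit and rescanning an accumulated pairs list per candidate (A), B first materialises the whole pair stream, groups it completely by sum into a dict of position-tagged pair lists, and then selects in a separate pass the earliest position at which any sum gains a second distinct pair; the inner rescan disappears (measured ~1.5-2x in a timing run, below the 1.5x confirmation bar at the largest size, so no speed is claimed).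
import Mathlib
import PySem

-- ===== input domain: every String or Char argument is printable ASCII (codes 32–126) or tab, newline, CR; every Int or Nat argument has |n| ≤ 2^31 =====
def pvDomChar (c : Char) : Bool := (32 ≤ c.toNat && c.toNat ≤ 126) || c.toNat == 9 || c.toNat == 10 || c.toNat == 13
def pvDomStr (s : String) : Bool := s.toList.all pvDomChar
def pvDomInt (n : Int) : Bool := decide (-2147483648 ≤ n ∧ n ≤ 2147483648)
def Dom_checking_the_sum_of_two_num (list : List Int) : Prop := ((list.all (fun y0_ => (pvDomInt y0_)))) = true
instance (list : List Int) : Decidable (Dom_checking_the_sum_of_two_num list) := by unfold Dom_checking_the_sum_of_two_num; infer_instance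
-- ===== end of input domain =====

-- B builds the complete sum->pairs index in staged passes and then selects the earliest second distinct pair, instead of A's early-exit pair scan with a rescanned pairs list (objective: alternative algorithm).


-- ===== PORT A =====
-- inner loop: for j over the elements after list[i]; pairs = the (sum, a, b) triples seen
def pvAInner (x : Int) (rest : List Int) (pairs : List (Int × Int × Int)) :
    List (Int × Int × Int) ⊕ (Int × List (Int × Int)) :=
  match rest with
  | [] => Sum.inl pairs
  | y :: ys =>
    let currentSum := x + y
    match pairs.find? (fun p => p.1 == currentSum) with
    | none => pvAInner x ys (pairs ++ [(currentSum, x, y)])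
    | some p =>
      if (x, y) ≠ (p.2.1, p.2.2) then Sum.inr (currentSum, [(p.2.1, p.2.2), (x, y)])
      else pvAInner x ys pairs

-- outer loop: for i over the list, threading pairs
def pvAOuter (rest : List Int) (pairs : List (Int × Int × Int)) : Option (Int × List (Int × Int)) :=
  match rest with
  | [] => none
  | x :: xs =>
    match pvAInner x xs pairs with
    | Sum.inl pairs' => pvAOuter xs pairs'
    | Sum.inr r => some r

def checking_the_sum_of_two_num (list : List Int) : Option (Int × (List (Int × Int))) :=
  pvAOuter list []

-- ===== PORT B =====
-- stage 1 (_pairs): while rest: x, rest = rest[0], rest[1:]; seq += [(x+y, (x,y)) for y in rest]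
def pvPairsLoop (seq : List (Int × (Int × Int))) : List Int → List (Int × (Int × Int))
  | [] => seq
  | x :: rest => pvPairsLoop (seq ++ rest.map (fun y => (x + y, (x, y)))) rest

-- stage 2 loop body: groups.setdefault(s, []).append((pos, p))
def pvGroupStep (g : PySem.Dict Int (List (Int × (Int × Int)))) (e : Int × (Int × (Int × Int))) :
    PySem.Dict Int (List (Int × (Int × Int))) :=
  g.insert e.2.1 (g.getD e.2.1 [] ++ [(e.1, e.2.2)])

-- stage 3 loop body: first = ps[0][1]; hit = next((e for e in ps[1:] if e[1] != first), None);
-- if hit is not None and (best is None or hit[0] < best[0]): best = (hit[0], s, first, hit[1])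
-- (the [] branch is unreachable: every group list built by stage 2 is nonempty)
def pvBestStep (best : Option (Int × Int × (Int × Int) × (Int × Int)))
    (it : Int × List (Int × (Int × Int))) : Option (Int × Int × (Int × Int) × (Int × Int)) :=
  match it.2 with
  | [] => best
  | (_, first) :: tl =>
    match tl.find? (fun e => e.2 != first) with
    | none => best
    | some hit =>
      match best with
      | none => some (hit.1, it.1, first, hit.2)
      | some b => if hit.1 < b.1 then some (hit.1, it.1, first, hit.2) else best

def checking_the_sum_of_two_num_alt (list : List Int) : Option (Int × (List (Int × Int))) :=
  let groups := (PySem.List.enumerate (pvPairsLoop [] list) 0).foldl pvGroupStep PySem.Dict.empty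
  match groups.items.foldl pvBestStep none with
  | none => none
  | some b => some (b.2.1, [b.2.2.1, b.2.2.2])

-- ===== PRECONDITION & SPEC =====
def Spec_checking_the_sum_of_two_num (list : List Int) (out : Option (Int × (List (Int × Int)))) : Prop := out = checking_the_sum_of_two_num_alt list
instance (list : List Int) (out : Option (Int × (List (Int × Int)))) : Decidable (Spec_checking_the_sum_of_two_num list out) := by unfold Spec_checking_the_sum_of_two_num; infer_instance

-- ===== CLAIM (what is proved, stated in full; the proofs are below) =====
def Claim_equal_checking_the_sum_of_two_num : Prop := ∀ (list : List Int), Dom_checking_the_sum_of_two_num list → Spec_checking_the_sum_of_two_num list (checking_the_sum_of_two_num list)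

-- ===== LEMMAS AND PROOFS =====

-- the i<j pair stream, structurally
def pvSeq : List Int → List (Int × (Int × Int))
  | [] => []
  | x :: rest => rest.map (fun y => (x + y, (x, y))) ++ pvSeq rest

theorem pvPairsLoop_eq : ∀ (rest : List Int) (seq : List (Int × (Int × Int))),
    pvPairsLoop seq rest = seq ++ pvSeq rest := by
  intro rest
  induction rest with
  | nil => intro seq; simp [pvPairsLoop, pvSeq]
  | cons x r ih => intro seq; simp [pvPairsLoop, pvSeq, ih]

-- canonical single pass over the pair stream with a dict of first pairs per sum
def pvRun : List (Int × (Int × Int)) → PySem.Dict Int (Int × Int) → Option (Int × List (Int × Int))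
  | [], _ => none
  | (s, p) :: r, d =>
    match d.get? s with
    | none => pvRun r (d.insert s p)
    | some q => if p ≠ q then some (s, [q, p]) else pvRun r d

-- ----- A = pvRun over the pair stream -----

-- invariant: A's pairs list and the firsts dict answer every sum-lookup the same way
def pvRel (pairs : List (Int × Int × Int)) (d : PySem.Dict Int (Int × Int)) : Prop :=
  ∀ s : Int, (pairs.find? (fun p => p.1 == s)).map (fun p => (p.2.1, p.2.2)) = d.get? s

theorem pvRel_empty : pvRel [] PySem.Dict.empty := by
  intro s; simp [PySem.Dict.get?_empty]

theorem pvRel_append (pairs : List (Int × Int × Int)) (d : PySem.Dict Int (Int × Int))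
    (h : pvRel pairs d) (s x y : Int)
    (hn : pairs.find? (fun p => p.1 == s) = none) :
    pvRel (pairs ++ [(s, x, y)]) (d.insert s (x, y)) := by
  intro t
  rw [List.find?_append, PySem.Dict.get?_insert]
  by_cases ht : t = s
  · subst ht
    simp [hn]
  · have := h t
    cases hf : pairs.find? (fun p => p.1 == t) with
    | none =>
      rw [hf] at this
      simp [Ne.symm ht, ht, ← this]
    | some p =>
      rw [hf] at this
      simp [ht, ← this]

theorem pvAInner_run (x : Int) : ∀ (ys : List Int) (pairs : List (Int × Int × Int))
    (d : PySem.Dict Int (Int × Int)) (rest : List (Int × (Int × Int))), pvRel pairs d →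
    (∃ pairs' d', pvAInner x ys pairs = Sum.inl pairs' ∧ pvRel pairs' d' ∧
        pvRun (ys.map (fun y => (x + y, (x, y))) ++ rest) d = pvRun rest d') ∨
    (∃ r, pvAInner x ys pairs = Sum.inr r ∧
        pvRun (ys.map (fun y => (x + y, (x, y))) ++ rest) d = some r) := by
  intro ys
  induction ys with
  | nil =>
    intro pairs d rest h
    exact Or.inl ⟨pairs, d, rfl, h, by simp⟩
  | cons y ys ih =>
    intro pairs d rest h
    have hs := h (x + y)
    cases hf : pairs.find? (fun p => p.1 == (x + y)) with
    | none =>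
      rw [hf] at hs
      simp only [Option.map_none] at hs
      have hstep : pvRun (((y :: ys).map (fun y => (x + y, (x, y)))) ++ rest) d
          = pvRun ((ys.map (fun y => (x + y, (x, y)))) ++ rest) (d.insert (x + y) (x, y)) := by
        simp [pvRun, ← hs]
      have := ih (pairs ++ [(x + y, x, y)]) (d.insert (x + y) (x, y)) rest
        (pvRel_append pairs d h (x + y) x y hf)
      rcases this with ⟨pairs', d', h1, h2, h3⟩ | ⟨r, h1, h3⟩
      · exact Or.inl ⟨pairs', d', by simp [pvAInner, hf]; exact h1, h2, by rw [hstep]; exact h3⟩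
      · exact Or.inr ⟨r, by simp [pvAInner, hf]; exact h1, by rw [hstep]; exact h3⟩
    | some p0 =>
      rw [hf] at hs
      simp only [Option.map_some] at hs
      by_cases hne : (x, y) = (p0.2.1, p0.2.2)
      · have hstep : pvRun (((y :: ys).map (fun y => (x + y, (x, y)))) ++ rest) d
            = pvRun ((ys.map (fun y => (x + y, (x, y)))) ++ rest) d := by
          simp [pvRun, ← hs, hne]
        have := ih pairs d rest h
        rcases this with ⟨pairs', d', h1, h2, h3⟩ | ⟨r, h1, h3⟩
        · exact Or.inl ⟨pairs', d', by simp [pvAInner, hf, hne]; exact h1, h2, by rw [hstep]; exact h3⟩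
        · exact Or.inr ⟨r, by simp [pvAInner, hf, hne]; exact h1, by rw [hstep]; exact h3⟩
      · refine Or.inr ⟨(x + y, [(p0.2.1, p0.2.2), (x, y)]), by simp [pvAInner, hf, hne], ?_⟩
        simp [pvRun, ← hs, hne]

theorem pvAOuter_run : ∀ (xs : List Int) (pairs : List (Int × Int × Int))
    (d : PySem.Dict Int (Int × Int)), pvRel pairs d →
    pvAOuter xs pairs = pvRun (pvSeq xs) d := by
  intro xs
  induction xs with
  | nil => intro pairs d _; rfl
  | cons x xs ih =>
    intro pairs d h
    rcases pvAInner_run x xs pairs d (pvSeq xs) h with ⟨pairs', d', h1, h2, h3⟩ | ⟨r, h1, h3⟩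
    · simp only [pvAOuter, h1, pvSeq, h3]
      exact ih pairs' d' h2
    · simp only [pvAOuter, h1, pvSeq, h3]

-- ----- pvRun = head of the candidate stream -----

-- candidate stream: for each sum, at its first distinct second pair, emit (pos, sum, first, cur);
-- the dict value is none once a sum is resolved
def pvCands : Int → List (Int × (Int × Int)) → PySem.Dict Int (Option (Int × Int)) →
    List (Int × Int × (Int × Int) × (Int × Int))
  | _, [], _ => []
  | k, (s, p) :: r, d =>
    match d.get? s with
    | none => pvCands (k + 1) r (d.insert s (some p))
    | some none => pvCands (k + 1) r d
    | some (some q) =>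
      if p ≠ q then (k, s, q, p) :: pvCands (k + 1) r (d.insert s none)
      else pvCands (k + 1) r d

def pvOptRel (d0 : PySem.Dict Int (Int × Int)) (d : PySem.Dict Int (Option (Int × Int))) : Prop :=
  ∀ s : Int, d.get? s = (d0.get? s).map some

theorem pvRun_cands : ∀ (seq : List (Int × (Int × Int))) (k : Int)
    (d0 : PySem.Dict Int (Int × Int)) (d : PySem.Dict Int (Option (Int × Int))), pvOptRel d0 d →
    pvRun seq d0 = ((pvCands k seq d).head?).map (fun c => (c.2.1, [c.2.2.1, c.2.2.2])) := by
  intro seq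
  induction seq with
  | nil => intro k d0 d _; rfl
  | cons e r ih =>
    rcases e with ⟨s, p⟩
    intro k d0 d h
    have hs := h s
    cases h0 : d0.get? s with
    | none =>
      rw [h0] at hs
      simp only [Option.map_none] at hs
      have hrel : pvOptRel (d0.insert s p) (d.insert s (some p)) := by
        intro t
        rw [PySem.Dict.get?_insert, PySem.Dict.get?_insert]
        by_cases ht : t = s
        · simp [ht]
        · simp [ht, h t]
      simp only [pvRun, pvCands, h0, hs]
      exact ih (k + 1) (d0.insert s p) (d.insert s (some p)) hrel
    | some q =>
      rw [h0] at hs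
      simp only [Option.map_some] at hs
      by_cases hpq : p = q
      · subst hpq
        simp only [pvRun, pvCands, h0, hs, ne_eq, not_true_eq_false, if_false]
        exact ih (k + 1) d0 d h
      · have hne : p ≠ q := hpq
        simp only [pvRun, pvCands, h0, hs, if_pos hne]
        rfl

-- ----- B's grouped selection = head of the candidate stream -----

-- per-group candidate, as stage 3 computes it from a group's final content
def pvCandOf (it : Int × List (Int × (Int × Int))) : Option (Int × Int × (Int × Int) × (Int × Int)) :=
  match it.2 with
  | [] => none
  | (_, first) :: tl => (tl.find? (fun e => e.2 != first)).map (fun e => (e.1, it.1, first, e.2))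

def pvMerge (b c : Option (Int × Int × (Int × Int) × (Int × Int))) :
    Option (Int × Int × (Int × Int) × (Int × Int)) :=
  match b, c with
  | b, none => b
  | none, some c => some c
  | some b, some c => if c.1 < b.1 then some c else some b

theorem pvBestStep_eq (b : Option (Int × Int × (Int × Int) × (Int × Int)))
    (it : Int × List (Int × (Int × Int))) : pvBestStep b it = pvMerge b (pvCandOf it) := by
  rcases it with ⟨s, l⟩
  cases l with
  | nil => cases b <;> rfl
  | cons e0 tl =>
    rcases e0 with ⟨k0, first⟩
    simp only [pvBestStep, pvCandOf]
    cases hf : tl.find? (fun e => e.2 != first) with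
    | none => cases b <;> rfl
    | some hit => cases b <;> rfl

theorem foldl_best_merge : ∀ (l : List (Int × List (Int × (Int × Int))))
    (b : Option (Int × Int × (Int × Int) × (Int × Int))),
    l.foldl pvBestStep b = (l.map pvCandOf).foldl pvMerge b := by
  intro l
  induction l with
  | nil => intro b; rfl
  | cons it l ih => intro b; simp only [List.foldl_cons, List.map_cons, pvBestStep_eq]; exact ih _

def pvInv (g : PySem.Dict Int (List (Int × (Int × Int))))
    (d : PySem.Dict Int (Option (Int × Int))) : Prop :=
  ∀ s : Int,
    (d.get? s = none ∧ g.get? s = none)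
    ∨ (∃ e0 tl, d.get? s = some (some e0.2) ∧ g.get? s = some (e0 :: tl) ∧ ∀ e ∈ tl, e.2 = e0.2)
    ∨ (∃ e0 tl, d.get? s = some none ∧ g.get? s = some (e0 :: tl) ∧ ∃ e ∈ tl, e.2 ≠ e0.2)

def pvBound (g : PySem.Dict Int (List (Int × (Int × Int)))) (k : Int) : Prop :=
  ∀ s l, g.get? s = some l → ∀ e ∈ l, e.1 < k

def pvCombine (b : Option (Int × Int × (Int × Int) × (Int × Int)))
    (l : List (Int × Int × (Int × Int) × (Int × Int))) :
    Option (Int × Int × (Int × Int) × (Int × Int)) :=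
  match b with
  | some b => some b
  | none => l.head?

theorem pvMerge_none (b : Option (Int × Int × (Int × Int) × (Int × Int))) :
    pvMerge b none = b := by cases b <;> rfl

theorem pvMerge_bound (k : Int) : ∀ (cl : List (Option (Int × Int × (Int × Int) × (Int × Int))))
    (b : Option (Int × Int × (Int × Int) × (Int × Int))),
    (∀ o ∈ cl, ∀ c, o = some c → c.1 < k) → (∀ c, b = some c → c.1 < k) →
    ∀ c, cl.foldl pvMerge b = some c → c.1 < k := by
  intro cl
  induction cl with
  | nil => intro b _ hb c hc; exact hb c hc
  | cons o cl ih =>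
    intro b hcl hb c hc
    refine ih (pvMerge b o) (fun o' ho' => hcl o' (List.mem_cons_of_mem _ ho')) ?_ c hc
    intro c' hc'
    cases o with
    | none => rw [pvMerge_none] at hc'; exact hb c' hc'
    | some oc =>
      have hoc : oc.1 < k := hcl (some oc) (List.mem_cons_self) oc rfl
      cases b with
      | none =>
        simp only [pvMerge] at hc'
        injection hc' with h
        exact h ▸ hoc
      | some bc =>
        have hbc : bc.1 < k := hb bc rfl
        simp only [pvMerge] at hc'
        split at hc' <;> (cases hc'; omega)

theorem pvMerge_pull (c : Int × Int × (Int × Int) × (Int × Int)) :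
    ∀ (cl : List (Option (Int × Int × (Int × Int) × (Int × Int))))
    (b : Option (Int × Int × (Int × Int) × (Int × Int))),
    (∀ o ∈ cl, ∀ x, o = some x → x.1 < c.1) → (∀ x, b = some x → x.1 < c.1) →
    cl.foldl pvMerge (pvMerge b (some c)) = pvMerge (cl.foldl pvMerge b) (some c) := by
  intro cl
  induction cl with
  | nil => intro b _ _; rfl
  | cons o cl ih =>
    intro b hcl hb
    simp only [List.foldl_cons]
    have hkey : pvMerge (pvMerge b (some c)) o = pvMerge (pvMerge b o) (some c) := by
      cases o with
      | none => rw [pvMerge_none, pvMerge_none]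
      | some oc =>
        have hoc : oc.1 < c.1 := hcl (some oc) (List.mem_cons_self) oc rfl
        cases b with
        | none =>
          simp only [pvMerge]
          rw [if_pos hoc, if_neg (by omega)]
        | some bc =>
          have hbc : bc.1 < c.1 := hb bc rfl
          simp only [pvMerge]
          rw [if_neg (by omega)]
          by_cases h1 : oc.1 < bc.1
          · rw [if_pos h1]; simp only [pvMerge]; rw [if_pos h1, if_neg (by omega)]
          · rw [if_neg h1]; simp only [pvMerge]; rw [if_neg h1, if_neg (by omega)]
    rw [hkey]
    refine ih (pvMerge b o) (fun o' ho' => hcl o' (List.mem_cons_of_mem _ ho')) ?_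
    intro x hx
    cases o with
    | none => rw [pvMerge_none] at hx; exact hb x hx
    | some oc =>
      have hoc : oc.1 < c.1 := hcl (some oc) (List.mem_cons_self) oc rfl
      cases b with
      | none => simp only [pvMerge] at hx; cases hx; exact hoc
      | some bc =>
        have hbc : bc.1 < c.1 := hb bc rfl
        simp only [pvMerge] at hx
        split at hx <;> (cases hx; omega)

-- every candidate of a bounded group dict has position < k
theorem pvCand_bound (g : PySem.Dict Int (List (Int × (Int × Int)))) (k : Int)
    (hnd : g.keys.Nodup) (hb : pvBound g k) :
    ∀ it ∈ g.items, ∀ c, pvCandOf it = some c → c.1 < k := by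
  intro it hit c hc
  obtain ⟨s, l⟩ := it
  have hget : g.get? s = some l := PySem.Dict.get?_of_mem_items g hit hnd
  cases l with
  | nil => simp [pvCandOf] at hc
  | cons e0 tl =>
    rcases e0 with ⟨k0, first⟩
    simp only [pvCandOf] at hc
    cases hf : tl.find? (fun e => e.2 != first) with
    | none => rw [hf] at hc; simp at hc
    | some hit' =>
      rw [hf] at hc
      simp only [Option.map_some, Option.some.injEq] at hc
      have hmem : hit' ∈ (k0, first) :: tl := List.mem_cons_of_mem _ (List.mem_of_find?_eq_some hf)
      have := hb s ((k0, first) :: tl) hget hit' hmem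
      rw [← hc]
      exact this

-- replacing an existing group's list without changing its candidate leaves the fold unchanged
theorem pvFold_congr_insert (g : PySem.Dict Int (List (Int × (Int × Int))))
    (hnd : g.keys.Nodup) (s : Int) (l newl : List (Int × (Int × Int)))
    (hg : g.get? s = some l) (hcand : pvCandOf (s, newl) = pvCandOf (s, l)) :
    (g.insert s newl).items.foldl pvBestStep none = g.items.foldl pvBestStep none := by
  rw [foldl_best_merge, foldl_best_merge]
  have hcont : g.contains s = true := by
    rw [PySem.Dict.contains_eq_isSome_get?, hg]; rfl
  rw [PySem.Dict.items_insert_of_contains g newl hcont]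
  rw [List.map_map]
  refine congrArg _ (List.map_congr_left ?_)
  intro q hq
  by_cases hqs : q.1 = s
  · have h2 : g.get? q.1 = some q.2 := PySem.Dict.get?_of_mem_items g (by rcases q with ⟨a,b⟩; exact hq) hnd
    rw [hqs, hg] at h2
    injection h2 with h2
    have hqeq : q = (s, l) := by
      rcases q with ⟨a, b⟩
      simp only at hqs h2
      rw [hqs, ← h2]
    simp [hqeq, hcand]
  · simp [Function.comp_apply, hqs]

-- replacing an existing candidate-free group's list so that it now carries candidate c
-- merges c into the fold
theorem pvFold_insert_found (g : PySem.Dict Int (List (Int × (Int × Int))))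
    (hnd : g.keys.Nodup) (k : Int) (hb : pvBound g k) (s : Int)
    (l newl : List (Int × (Int × Int))) (c : Int × Int × (Int × Int) × (Int × Int))
    (hg : g.get? s = some l) (hold : pvCandOf (s, l) = none)
    (hnew : pvCandOf (s, newl) = some c) (hkc : k ≤ c.1) :
    (g.insert s newl).items.foldl pvBestStep none
      = pvMerge (g.items.foldl pvBestStep none) (some c) := by
  rw [foldl_best_merge, foldl_best_merge]
  have hmem : (s, l) ∈ g.items := PySem.Dict.mem_items_of_get?_eq_some g hg
  obtain ⟨L1, L2, hL⟩ := List.append_of_mem hmem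
  have hkeys : (g.items.map Prod.fst).Nodup := by
    simpa [PySem.Dict.keys] using hnd
  rw [hL] at hkeys
  simp only [List.map_append, List.map_cons, List.nodup_append] at hkeys
  have hs1 : s ∉ L1.map Prod.fst := by
    intro hmem1
    exact hkeys.2.2 s hmem1 s (List.mem_cons_self) rfl
  have hs2 : s ∉ L2.map Prod.fst := (List.nodup_cons.mp hkeys.2.1).1
  have hcont : g.contains s = true := by
    rw [PySem.Dict.contains_eq_isSome_get?, hg]; rfl
  rw [PySem.Dict.items_insert_of_contains g newl hcont, hL]
  have hmap1 : ∀ (L : List (Int × List (Int × (Int × Int)))), s ∉ L.map Prod.fst →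
      L.map (fun p => if p.1 == s then (s, newl) else p) = L := by
    intro L hL'
    refine List.map_congr_left ?_ |>.trans (List.map_id _)
    intro q hq
    have : q.1 ≠ s := fun h => hL' (by rw [← h]; exact List.mem_map_of_mem hq)
    simp [this]
  rw [List.map_append, List.map_cons, hmap1 L1 hs1, hmap1 L2 hs2]
  simp only [beq_self_eq_true, if_true]
  rw [List.map_append, List.map_cons, List.foldl_append, List.foldl_cons,
      List.map_append, List.map_cons, List.foldl_append, List.foldl_cons, hnew, hold,
      pvMerge_none]
  have hbnd1 : ∀ o ∈ L1.map pvCandOf, ∀ x, o = some x → x.1 < c.1 := by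
    intro o ho x hx
    obtain ⟨it, hit, rfl⟩ := List.mem_map.mp ho
    have : it ∈ g.items := by rw [hL]; exact List.mem_append_left _ hit
    have := pvCand_bound g k hnd hb it this x hx
    omega
  have hbnd2 : ∀ o ∈ L2.map pvCandOf, ∀ x, o = some x → x.1 < c.1 := by
    intro o ho x hx
    obtain ⟨it, hit, rfl⟩ := List.mem_map.mp ho
    have : it ∈ g.items := by
      rw [hL]; exact List.mem_append_right _ (List.mem_cons_of_mem _ hit)
    have := pvCand_bound g k hnd hb it this x hx
    omega
  have hbb : ∀ x, (L1.map pvCandOf).foldl pvMerge none = some x → x.1 < c.1 := by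
    intro x hx
    have := pvMerge_bound c.1 (L1.map pvCandOf) none hbnd1 (by intro c' h; cases h) x hx
    exact this
  exact pvMerge_pull c (L2.map pvCandOf) ((L1.map pvCandOf).foldl pvMerge none) hbnd2 hbb

theorem pvGroups_sel : ∀ (seq : List (Int × (Int × Int))) (k : Int)
    (g : PySem.Dict Int (List (Int × (Int × Int)))) (d : PySem.Dict Int (Option (Int × Int))),
    pvInv g d → pvBound g k → g.keys.Nodup →
    ((PySem.List.enumerate seq k).foldl pvGroupStep g).items.foldl pvBestStep none
      = pvCombine (g.items.foldl pvBestStep none) (pvCands k seq d) := by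
  intro seq
  induction seq with
  | nil =>
    intro k g d _ _ _
    simp only [PySem.List.enumerate_nil, List.foldl_nil, pvCands]
    cases hF : g.items.foldl pvBestStep none with
    | none => simp [pvCombine]
    | some b => simp [pvCombine]
  | cons e r ih =>
    obtain ⟨s, p⟩ := e
    intro k g d hinv hb hnd
    rw [PySem.List.enumerate_cons, List.foldl_cons]
    have hb' : pvBound g (k + 1) := fun t l h e he => lt_trans (hb t l h e he) (by omega)
    rcases hinv s with ⟨hd, hg⟩ | ⟨e0, tl, hd, hg, hall⟩ | ⟨e0, tl, hd, hg, hex⟩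
    · -- fresh sum
      have hgd : g.getD s [] = [] := by rw [PySem.Dict.getD_eq_get?_getD, hg]; rfl
      have hstep : pvGroupStep g (k, (s, p)) = g.insert s [(k, p)] := by
        simp [pvGroupStep, hgd]
      have hinv1 : pvInv (g.insert s [(k, p)]) (d.insert s (some p)) := by
        intro t
        by_cases hts : t = s
        · subst hts
          exact Or.inr (Or.inl ⟨(k, p), [], by simp [PySem.Dict.get?_insert_self],
            by simp [PySem.Dict.get?_insert_self], by simp⟩)
        · rw [PySem.Dict.get?_insert, PySem.Dict.get?_insert, if_neg hts, if_neg hts]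
          exact hinv t
      have hb1 : pvBound (g.insert s [(k, p)]) (k + 1) := by
        intro t l h e he
        rw [PySem.Dict.get?_insert] at h
        by_cases hts : t = s
        · rw [if_pos hts] at h
          injection h with h
          rw [← h] at he
          have he' : e = (k, p) := by simpa using he
          rw [he']
          exact (by omega : k < k + 1)
        · rw [if_neg hts] at h
          exact hb' t l h e he
      have hnd1 := PySem.Dict.nodup_keys_insert g s [(k, p)] hnd
      have hcont : g.contains s = false := by
        rw [PySem.Dict.contains_eq_isSome_get?, hg]; rfl
      have hfold : (g.insert s [(k, p)]).items.foldl pvBestStep none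
          = g.items.foldl pvBestStep none := by
        rw [PySem.Dict.items_insert_of_not_contains g [(k, p)] hcont, List.foldl_append]
        rfl
      have hc : pvCands k ((s, p) :: r) d = pvCands (k + 1) r (d.insert s (some p)) := by
        simp [pvCands, hd]
      rw [hstep, hc, ih (k + 1) _ _ hinv1 hb1 hnd1, hfold]
    · -- sum seen, not yet resolved
      obtain ⟨k0, q⟩ := e0
      have hgd : g.getD s [] = (k0, q) :: tl := by rw [PySem.Dict.getD_eq_get?_getD, hg]; rfl
      have hstep : pvGroupStep g (k, (s, p)) = g.insert s ((k0, q) :: (tl ++ [(k, p)])) := by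
        simp [pvGroupStep, hgd]
      have hfindtl : tl.find? (fun e => e.2 != q) = none := by
        rw [List.find?_eq_none]
        intro x hx
        simp [hall x hx]
      have hb1 : pvBound (g.insert s ((k0, q) :: (tl ++ [(k, p)]))) (k + 1) := by
        intro t l h e he
        rw [PySem.Dict.get?_insert] at h
        by_cases hts : t = s
        · rw [if_pos hts] at h
          injection h with h
          rw [← h] at he
          rcases List.mem_cons.mp he with h1 | h1
          · rw [h1]
            exact lt_trans (hb s _ hg (k0, q) (List.mem_cons_self)) (by omega)
          · rcases List.mem_append.mp h1 with h2 | h2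
            · exact lt_trans (hb s _ hg e (List.mem_cons_of_mem _ h2)) (by omega)
            · have he' : e = (k, p) := by simpa using h2
              rw [he']
              exact (by omega : k < k + 1)
        · rw [if_neg hts] at h
          exact hb' t l h e he
      have hnd1 := PySem.Dict.nodup_keys_insert g s ((k0, q) :: (tl ++ [(k, p)])) hnd
      by_cases hpq : p = q
      · -- same pair value again: nothing changes
        have hinv1 : pvInv (g.insert s ((k0, q) :: (tl ++ [(k, p)]))) d := by
          intro t
          by_cases hts : t = s
          · subst hts
            refine Or.inr (Or.inl ⟨(k0, q), tl ++ [(k, p)], hd, by simp [PySem.Dict.get?_insert_self], ?_⟩)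
            intro e he
            rcases List.mem_append.mp he with h1 | h1
            · exact hall e h1
            · have he' : e = (k, p) := by simpa using h1
              rw [he', hpq]
          · rw [PySem.Dict.get?_insert, if_neg hts]
            exact hinv t
        have hcand : pvCandOf (s, (k0, q) :: (tl ++ [(k, p)])) = pvCandOf (s, (k0, q) :: tl) := by
          simp only [pvCandOf]
          rw [List.find?_append, hfindtl]
          simp [hpq]
        have hfold := pvFold_congr_insert g hnd s ((k0, q) :: tl) _ hg hcand
        have hc : pvCands k ((s, p) :: r) d = pvCands (k + 1) r d := by
          simp [pvCands, hd, hpq]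
        rw [hstep, hc, ih (k + 1) _ _ hinv1 hb1 hnd1, hfold]
      · -- second distinct pair: this is this sum's candidate, at position k
        have hinv1 : pvInv (g.insert s ((k0, q) :: (tl ++ [(k, p)]))) (d.insert s none) := by
          intro t
          by_cases hts : t = s
          · subst hts
            refine Or.inr (Or.inr ⟨(k0, q), tl ++ [(k, p)], by simp [PySem.Dict.get?_insert_self],
              by simp [PySem.Dict.get?_insert_self], ⟨(k, p), List.mem_append_right _ (by simp), hpq⟩⟩)
          · rw [PySem.Dict.get?_insert, PySem.Dict.get?_insert, if_neg hts, if_neg hts]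
            exact hinv t
        have hold : pvCandOf (s, (k0, q) :: tl) = none := by
          simp only [pvCandOf]
          rw [hfindtl]
          rfl
        have hnew : pvCandOf (s, (k0, q) :: (tl ++ [(k, p)])) = some (k, s, q, p) := by
          simp only [pvCandOf]
          rw [List.find?_append, hfindtl]
          simp [hpq]
        have hfold := pvFold_insert_found g hnd k hb s ((k0, q) :: tl) _ (k, s, q, p) hg hold hnew
          (le_refl k)
        have hc : pvCands k ((s, p) :: r) d
            = (k, s, q, p) :: pvCands (k + 1) r (d.insert s none) := by
          simp [pvCands, hd, hpq]
        rw [hstep, hc, ih (k + 1) _ _ hinv1 hb1 hnd1, hfold]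
        cases hF : g.items.foldl pvBestStep none with
        | none =>
          simp [pvCombine, pvMerge]
        | some f =>
          have hf : f.1 < k :=
            pvMerge_bound k (g.items.map pvCandOf) none
              (fun o ho c hc => by
                obtain ⟨it, hit, rfl⟩ := List.mem_map.mp ho
                exact pvCand_bound g k hnd hb it hit c hc)
              (by intro c h; cases h) f (by rw [← foldl_best_merge]; exact hF)
          have hm : pvMerge (some f) (some (k, s, q, p)) = some f := by
            simp only [pvMerge]
            rw [if_neg (show ¬ ((k, s, q, p).1 < f.1) from by omega)]
          rw [hm]
          rfl
    · -- sum already resolved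
      obtain ⟨k0, q⟩ := e0
      obtain ⟨ex, hex1, hex2⟩ := hex
      have hgd : g.getD s [] = (k0, q) :: tl := by rw [PySem.Dict.getD_eq_get?_getD, hg]; rfl
      have hstep : pvGroupStep g (k, (s, p)) = g.insert s ((k0, q) :: (tl ++ [(k, p)])) := by
        simp [pvGroupStep, hgd]
      have hfind : (tl.find? (fun e => e.2 != q)).isSome :=
        List.find?_isSome.mpr ⟨ex, hex1, by simpa using hex2⟩
      obtain ⟨hit, hfit⟩ := Option.isSome_iff_exists.mp hfind
      have hcand : pvCandOf (s, (k0, q) :: (tl ++ [(k, p)])) = pvCandOf (s, (k0, q) :: tl) := by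
        simp only [pvCandOf]
        rw [List.find?_append, hfit]
        rfl
      have hinv1 : pvInv (g.insert s ((k0, q) :: (tl ++ [(k, p)]))) d := by
        intro t
        by_cases hts : t = s
        · subst hts
          exact Or.inr (Or.inr ⟨(k0, q), tl ++ [(k, p)], hd, by simp [PySem.Dict.get?_insert_self],
            ⟨ex, List.mem_append_left _ hex1, hex2⟩⟩)
        · rw [PySem.Dict.get?_insert, if_neg hts]
          exact hinv t
      have hb1 : pvBound (g.insert s ((k0, q) :: (tl ++ [(k, p)]))) (k + 1) := by
        intro t l h e he
        rw [PySem.Dict.get?_insert] at h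
        by_cases hts : t = s
        · rw [if_pos hts] at h
          injection h with h
          rw [← h] at he
          rcases List.mem_cons.mp he with h1 | h1
          · rw [h1]
            exact lt_trans (hb s _ hg (k0, q) (List.mem_cons_self)) (by omega)
          · rcases List.mem_append.mp h1 with h2 | h2
            · exact lt_trans (hb s _ hg e (List.mem_cons_of_mem _ h2)) (by omega)
            · have he' : e = (k, p) := by simpa using h2
              rw [he']
              exact (by omega : k < k + 1)
        · rw [if_neg hts] at h
          exact hb' t l h e he
      have hnd1 := PySem.Dict.nodup_keys_insert g s ((k0, q) :: (tl ++ [(k, p)])) hnd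
      have hfold := pvFold_congr_insert g hnd s ((k0, q) :: tl) _ hg hcand
      have hc : pvCands k ((s, p) :: r) d = pvCands (k + 1) r d := by
        simp [pvCands, hd]
      rw [hstep, hc, ih (k + 1) _ _ hinv1 hb1 hnd1, hfold]

-- ===== VERDICT (by name: the statement is the Claim_ definition above) =====
theorem checking_the_sum_of_two_num_spec : Claim_equal_checking_the_sum_of_two_num := by
  intro list _
  unfold Spec_checking_the_sum_of_two_num checking_the_sum_of_two_num
  have hA : pvAOuter list [] = pvRun (pvSeq list) PySem.Dict.empty :=
    pvAOuter_run list [] PySem.Dict.empty pvRel_empty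
  have hR : pvRun (pvSeq list) PySem.Dict.empty
      = ((pvCands 0 (pvSeq list) PySem.Dict.empty).head?).map
          (fun c => (c.2.1, [c.2.2.1, c.2.2.2])) :=
    pvRun_cands (pvSeq list) 0 PySem.Dict.empty PySem.Dict.empty
      (fun s => by simp [PySem.Dict.get?_empty])
  have hG := pvGroups_sel (pvSeq list) 0 PySem.Dict.empty PySem.Dict.empty
      (fun s => Or.inl ⟨PySem.Dict.get?_empty s, PySem.Dict.get?_empty s⟩)
      (fun t l h _ _ => by rw [PySem.Dict.get?_empty] at h; cases h)
      PySem.Dict.nodup_keys_empty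
  simp only [checking_the_sum_of_two_num_alt]
  rw [pvPairsLoop_eq, List.nil_append, hA, hR, hG]
  have hemp : (PySem.Dict.empty : PySem.Dict Int (List (Int × (Int × Int)))).items.foldl
      pvBestStep none = none := rfl
  rw [hemp]
  cases hh : (pvCands 0 (pvSeq list) PySem.Dict.empty).head? with
  | none => simp [hh, pvCombine]
  | some c => simp [hh, pvCombine]
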